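-- pv_equiv track=rewrite | github.com/manishsat/TTB | backend/app/verification.py | extract_product_type
-- ===== SOURCE A (Python) =====
-- from typing import Optional
--
-- def extract_product_type(text: str) -> Optional[str]:
--     """
--     Extract product type from label text
--
--     Args:
--         text: OCR extracted text
--
--     Returns:
--         Likely product type or None
--     """
--     # Common alcohol product types
--     product_types = [
--         'bourbon whiskey', 'bourbon', 'whiskey', 'whisky',
--         'vodka', 'rum', 'gin', 'tequila', 'brandy',
--         'scotch', 'rye', 'cognac', 'beer', 'wine',
--         'kentucky straight bourbon whiskey'
--     ]
--
--     text_lower = text.lower()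
--
--     # Find the longest matching product type
--     found_types = []
--     for ptype in product_types:
--         if ptype in text_lower:
--             found_types.append(ptype)
--
--     if found_types:
--         # Return longest match (more specific)
--         return max(found_types, key=len).title()
--
--     return None
-- ===== SOURCE B (Python) =====
-- from typing import Optional
--
-- # Precomputed lookup table: the fixed product types ordered longest-first
-- # (ties keep the original list order), each paired with its title-cased form.
-- _CANDIDATES = [
--     ('kentucky straight bourbon whiskey', 'Kentucky Straight Bourbon Whiskey'),
--     ('bourbon whiskey', 'Bourbon Whiskey'),
--     ('bourbon', 'Bourbon'),
--     ('whiskey', 'Whiskey'),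
--     ('tequila', 'Tequila'),
--     ('whisky', 'Whisky'),
--     ('brandy', 'Brandy'),
--     ('scotch', 'Scotch'),
--     ('cognac', 'Cognac'),
--     ('vodka', 'Vodka'),
--     ('beer', 'Beer'),
--     ('wine', 'Wine'),
--     ('rum', 'Rum'),
--     ('gin', 'Gin'),
--     ('rye', 'Rye'),
-- ]
--
-- def extract_product_type(text: str) -> Optional[str]:
--     """Longest known product type in text, via a precomputed longest-first
--     table of (pattern, result): return the result of the first pattern found."""
--     text_lower = text.lower()
--     for pattern, result in _CANDIDATES:
--         if pattern in text_lower: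
--             return result
--     return None
-- ===== Notes on version B (the rewrite author's own statement) =====
-- stated objective: simpler
-- what changed: Instead of collecting every matching product type, taking the max by length and title-casing it at runtime, B keeps a precomputed lookup table of (pattern, title-cased result) pairs ordered longest-first and returns the result of the first pattern found in the lowercased text.
import Mathlib
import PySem

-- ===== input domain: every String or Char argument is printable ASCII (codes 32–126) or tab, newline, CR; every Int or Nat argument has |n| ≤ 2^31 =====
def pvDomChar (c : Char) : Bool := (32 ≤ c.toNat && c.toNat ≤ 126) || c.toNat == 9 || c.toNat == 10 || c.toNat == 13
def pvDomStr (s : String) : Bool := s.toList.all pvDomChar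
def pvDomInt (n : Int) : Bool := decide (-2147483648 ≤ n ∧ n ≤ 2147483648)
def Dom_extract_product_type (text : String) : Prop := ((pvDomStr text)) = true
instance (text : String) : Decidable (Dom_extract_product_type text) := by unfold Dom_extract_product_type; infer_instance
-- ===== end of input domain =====

-- B replaces "collect all matches, max by length, title-case at runtime" with a precomputed
-- longest-first table of (pattern, title-cased result): first pattern found wins (objective: simpler).

-- hand port of Python's str.title(), step for step (exact on ASCII: a char starts a word iff
-- the previous char is not alphabetic); used by A's port, which calls .title() at runtime
def pvTitleChars : List Char → Bool → List Char
  | [], _ => []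
  | c :: rest, prevAlpha =>
      (if prevAlpha then PySem.Chars.lowerChar c else PySem.Chars.upperChar c)
        :: pvTitleChars rest (PySem.Chars.isalpha c)

def pvTitle (s : String) : String := String.ofList (pvTitleChars s.toList false)

-- ===== PORT A =====
def extract_product_type (text : String) : Option String :=
  let product_types : List String :=
    ["bourbon whiskey", "bourbon", "whiskey", "whisky",
     "vodka", "rum", "gin", "tequila", "brandy",
     "scotch", "rye", "cognac", "beer", "wine",
     "kentucky straight bourbon whiskey"]
  let text_lower := PySem.Str.lower text
  let found_types :=
    product_types.foldl
      (fun acc ptype => if PySem.Str.isIn ptype text_lower then acc ++ [ptype] else acc) []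
  if found_types ≠ [] then
    match PySem.List.max? found_types (fun p => PySem.Str.len p) with
    | some m => some (pvTitle m)
    | none => none
  else none

-- ===== PORT B =====
-- the module-level constant _CANDIDATES of Source B
def pvCandidates : List (String × String) :=
  [("kentucky straight bourbon whiskey", "Kentucky Straight Bourbon Whiskey"),
   ("bourbon whiskey", "Bourbon Whiskey"),
   ("bourbon", "Bourbon"),
   ("whiskey", "Whiskey"),
   ("tequila", "Tequila"),
   ("whisky", "Whisky"),
   ("brandy", "Brandy"),
   ("scotch", "Scotch"),
   ("cognac", "Cognac"),
   ("vodka", "Vodka"),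
   ("beer", "Beer"),
   ("wine", "Wine"),
   ("rum", "Rum"),
   ("gin", "Gin"),
   ("rye", "Rye")]

-- Source B's for-loop with early return
def pvScanTable (text_lower : String) : List (String × String) → Option String
  | [] => none
  | (pattern, result) :: rest =>
      if PySem.Str.isIn pattern text_lower then some result
      else pvScanTable text_lower rest

def extract_product_type_alt (text : String) : Option String :=
  pvScanTable (PySem.Str.lower text) pvCandidates

-- ===== PRECONDITION & SPEC =====
def Spec_extract_product_type (text : String) (out : Option String) : Prop := out = extract_product_type_alt text
instance (text : String) (out : Option String) : Decidable (Spec_extract_product_type text out) := by unfold Spec_extract_product_type; infer_instance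

-- ===== CLAIM (what is proved, stated in full; the proofs are below) =====
def Claim_equal_extract_product_type : Prop := ∀ (text : String), Dom_extract_product_type text → Spec_extract_product_type text (extract_product_type text)

-- ===== LEMMAS AND PROOFS =====

-- the step of Python's max(xs, key=k): first element with maximal key wins
def pvMaxStep {α : Type} (k : α → Int) : Option α → α → Option α :=
  fun acc x =>
    match acc with
    | none => some x
    | some m => if k m < k x then some x else some m

theorem pvMax?_eq_foldl {α : Type} (xs : List α) (k : α → Int) :
    PySem.List.max? xs k = xs.foldl (pvMaxStep k) none := rfl

theorem pvMax?_filter {α : Type} (l : List α) (k : α → Int) (q : α → Bool) :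
    PySem.List.max? (l.filter q) k
      = l.foldl (fun acc x => if q x = true then pvMaxStep k acc x else acc) none := by
  rw [pvMax?_eq_foldl, List.foldl_filter]

theorem pvFind?_insertBy {α : Type} (k : α → Int) (q : α → Bool) (x : α) (acc : List α)
    (h : acc.Pairwise (fun a b => k b ≤ k a)) :
    List.find? q (PySem.List.insertBy (fun a b => decide (k b < k a)) x acc)
      = (if q x = true then pvMaxStep k (List.find? q acc) x else List.find? q acc) := by
  induction acc with
  | nil =>
    by_cases hq : q x = true <;> simp [PySem.List.insertBy, hq, pvMaxStep]
  | cons y ys ih =>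
    rw [List.pairwise_cons] at h
    by_cases hxy : k y < k x
    · simp only [PySem.List.insertBy, hxy, decide_true]
      by_cases hq : q x = true
      · cases hm : List.find? q (y :: ys) with
        | none => simp [hq, pvMaxStep]
        | some m =>
          have hmem : m ∈ y :: ys := List.mem_of_find?_eq_some hm
          have hle : k m ≤ k y := by
            rcases List.mem_cons.mp hmem with rfl | hm'
            · exact le_refl _
            · exact h.1 m hm'
          have hlt : k m < k x := lt_of_le_of_lt hle hxy
          simp [hq, pvMaxStep, hlt]
      · simp [List.find?_cons, hq]
    · simp only [PySem.List.insertBy, hxy, decide_false]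
      simp only [Bool.false_eq_true, if_false]
      by_cases hqy : q y = true
      · simp [hqy, pvMaxStep, hxy]
      · rw [List.find?_cons_of_neg (by simp [hqy]), List.find?_cons_of_neg (by simp [hqy])]
        exact ih h.2

theorem pvLoop {α : Type} (k : α → Int) (q : α → Bool) (xs : List α) :
    ∀ (acc : List α), acc.Pairwise (fun a b => k b ≤ k a) →
    List.find? q (xs.foldl (fun acc x => PySem.List.insertBy (fun a b => decide (k b < k a)) x acc) acc)
      = xs.foldl (fun r x => if q x = true then pvMaxStep k r x else r) (List.find? q acc) := by
  induction xs with
  | nil => intro acc _; simp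
  | cons x xs ih =>
    intro acc hacc
    simp only [List.foldl_cons]
    rw [ih _ (PySem.List.insertBy_pairwise_ge k x acc hacc), pvFind?_insertBy k q x acc hacc]

theorem pvFind?_sorted_eq_max?_filter {α : Type} (l : List α) (k : α → Int) (q : α → Bool) :
    List.find? q (PySem.List.sorted l k true) = PySem.List.max? (l.filter q) k := by
  rw [PySem.List.sorted_rev_eq_foldl_insertBy, pvMax?_filter,
      pvLoop k q l [] List.Pairwise.nil, List.find?_nil]

theorem pvFoldl_append_id (q : String → Bool) (l : List String) :
    l.foldl (fun acc x => if q x = true then acc ++ [x] else acc) [] = l.filter q := by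
  rw [PySem.List.foldl_append_if q (fun x => x) l []]
  simp

-- B's table is exactly A's type list, stably sorted length-descending, paired with its title-casing
theorem pvCandidates_eq :
    pvCandidates
      = (PySem.List.sorted
          ["bourbon whiskey", "bourbon", "whiskey", "whisky",
           "vodka", "rum", "gin", "tequila", "brandy",
           "scotch", "rye", "cognac", "beer", "wine",
           "kentucky straight bourbon whiskey"] (fun p => PySem.Str.len p) true).map
          (fun p => (p, pvTitle p)) := by decide

-- scanning a (pattern ↦ pvTitle pattern) table = find the pattern, then title it
theorem pvScanTable_map (tl : String) (l : List String) :
    pvScanTable tl (l.map (fun p => (p, pvTitle p)))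
      = (List.find? (fun p => PySem.Str.isIn p tl) l).map pvTitle := by
  induction l with
  | nil => rfl
  | cons p rest ih =>
    by_cases h : PySem.Chars.isIn p.toList tl.toList = true
    · simp [pvScanTable, PySem.Str.isIn, h]
    · simp only [List.map_cons, pvScanTable, PySem.Str.isIn, h, Bool.false_eq_true, if_false]
      rw [List.find?_cons_of_neg (by simp [h])]
      exact ih

-- ===== VERDICT (by name: the statement is the Claim_ definition above) =====
theorem extract_product_type_spec : Claim_equal_extract_product_type := by
  intro text _
  unfold Spec_extract_product_type extract_product_type extract_product_type_alt
  simp only []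
  rw [pvCandidates_eq, pvScanTable_map, pvFind?_sorted_eq_max?_filter, pvFoldl_append_id]
  set L : List String :=
    ["bourbon whiskey", "bourbon", "whiskey", "whisky",
     "vodka", "rum", "gin", "tequila", "brandy",
     "scotch", "rye", "cognac", "beer", "wine",
     "kentucky straight bourbon whiskey"] with hL
  set q : String → Bool := fun p => PySem.Str.isIn p (PySem.Str.lower text) with hq
  by_cases hempty : L.filter q = []
  · simp [hempty]
  · rw [if_pos]
    · cases hm : PySem.List.max? (L.filter q) (fun p => PySem.Str.len p) with
      | none => exact absurd ((PySem.List.max?_eq_none_iff _ _).mp hm) hempty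
      | some m => simp
    · exact hempty
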